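-- pv_equiv track=rewrite | github.com/dustinjray/budget_app_codecamp | budget.py | add_category_names
-- ===== SOURCE A (Python) =====
-- def add_category_names(names):
--     rows = len(max(names, key=len))
--     names_string = ""
--     for row in range(0, rows):
--         text = "\n" + " " * 5
--         for name in names:
--             if row < len(name):
--                 text += name[row].ljust(3)
--             else:
--                 text += " " * 3
--         names_string += text
--     return names_string
-- ===== SOURCE B (Python) =====
-- def add_category_names(names):
--     rows = len(max(names, key=len))
--     bufs = [[] for _ in range(rows)]
--     fill = [0] * rows
--     for j, name in enumerate(names):
--         for r, ch in enumerate(name):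
--             bufs[r].append(" " * (3 * j - fill[r]) + ch)
--             fill[r] = 3 * j + 1
--     width = 3 * len(names)
--     return "".join("\n" + " " * 5 + "".join(bufs[r]) + " " * (width - fill[r])
--                    for r in range(rows))
-- ===== Notes on version B (the rewrite author's own statement) =====
-- stated objective: alternative
-- what changed: B inverts the traversal: instead of A's row-major double loop with a per-cell length branch, B scans each name once (column-major), writing each character into its row buffer at position 3*j via positional padding, then pads every buffer to the full width at the end; no per-cell branch, short names are never revisited for missing rows.
import Mathlib
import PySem

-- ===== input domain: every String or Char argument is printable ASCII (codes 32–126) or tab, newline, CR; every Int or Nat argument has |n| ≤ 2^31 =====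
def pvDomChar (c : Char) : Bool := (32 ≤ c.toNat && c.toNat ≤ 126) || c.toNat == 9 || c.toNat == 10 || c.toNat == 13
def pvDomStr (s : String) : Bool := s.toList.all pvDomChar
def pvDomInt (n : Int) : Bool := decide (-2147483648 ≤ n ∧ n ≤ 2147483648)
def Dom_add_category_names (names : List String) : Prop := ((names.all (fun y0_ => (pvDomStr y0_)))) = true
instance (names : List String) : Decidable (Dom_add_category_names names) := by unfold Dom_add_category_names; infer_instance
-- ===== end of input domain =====

-- B inverts A's traversal: one column-major pass over the names appending gap-padded segments to per-row buffers (with fill counters), instead of A's row-major double loop with a per-cell length branch (objective: alternative).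


-- ===== PORT A =====
-- exact port of str.ljust(w) with the default space fill (pads on the right up to width w)
def pyLjust (cs : List Char) (w : Int) : List Char :=
  cs ++ List.replicate (w.toNat - cs.length) ' '

def add_category_names (names : List String) : String :=
  let rows : Int := PySem.Str.len ((PySem.List.max? names PySem.Str.len).getD "")
  let out : List Char := (PySem.List.pyRange 0 rows 1).foldl (fun acc row =>
    let text : List Char := '\n' :: List.replicate 5 ' '
    let text := names.foldl (fun t name =>
      if row < PySem.Str.len name then
        t ++ pyLjust [PySem.List.pyGetD name.toList row ' '] 3
      else
        t ++ List.replicate 3 ' ') text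
    acc ++ text) []
  String.ofList out

-- ===== PORT B =====
-- state = (bufs, fill); 'bufs[r]'/'fill[r]' reads use getD (the indices are always in range in Source B);
-- Python's ' ' * k with the Int gap ported as List.replicate k.toNat (both give '' for k ≤ 0)
def add_category_names_alt (names : List String) : String :=
  let rows : Int := PySem.Str.len ((PySem.List.max? names PySem.Str.len).getD "")
  let st : List (List (List Char)) × List Int :=
    (PySem.List.enumerate names).foldl (fun st jn =>
      (PySem.List.enumerate jn.2.toList).foldl (fun st rc =>
        (st.1.set rc.1.toNat ((st.1.getD rc.1.toNat []) ++
            [List.replicate (3 * jn.1 - st.2.getD rc.1.toNat 0).toNat ' ' ++ [rc.2]]),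
         st.2.set rc.1.toNat (3 * jn.1 + 1))) st)
      (List.replicate rows.toNat [], List.replicate rows.toNat 0)
  let width : Int := 3 * (names.length : Int)
  String.ofList (((List.range rows.toNat).map (fun r =>
    '\n' :: (List.replicate 5 ' ' ++ ((st.1.getD r []).flatten ++
      List.replicate (width - st.2.getD r 0).toNat ' ')))).flatten)

-- ===== PRECONDITION & SPEC =====
-- Pre_ excludes only the empty list, on which Python's max() (kept by both A and B) raises ValueError.
def Pre_add_category_names (names : List String) : Prop := names ≠ []
instance (names : List String) : Decidable (Pre_add_category_names names) := by unfold Pre_add_category_names; infer_instance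
def pvWitness_add_category_names : List String := ["food", "rent"]

def Spec_add_category_names (names : List String) (out : String) : Prop := out = add_category_names_alt names
instance (names : List String) (out : String) : Decidable (Spec_add_category_names names out) := by unfold Spec_add_category_names; infer_instance

-- ===== CLAIM (what is proved, stated in full; the proofs are below) =====
def Claim_equal_add_category_names : Prop := ∀ (names : List String), Dom_add_category_names names → Pre_add_category_names names → Spec_add_category_names names (add_category_names names)

-- ===== LEMMAS AND PROOFS =====

-- the 3-wide cell of name at row r (pyLjust [] 3 = three spaces, the 'missing' cell)
def cellAt (r : Nat) (name : String) : List Char :=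
  pyLjust (if r < name.toList.length then [name.toList.getD r ' '] else []) 3

-- A's row = the flattened cells of all names at that row
theorem a_row_eq (names : List String) (k : Nat) :
    names.foldl (fun t name =>
        if (k : Int) < (name.toList.length : Int) then
          t ++ pyLjust [PySem.List.pyGetD name.toList (k : Int) ' '] 3
        else t ++ List.replicate 3 ' ') ('\n' :: List.replicate 5 ' ')
    = '\n' :: (List.replicate 5 ' ' ++ (names.map (cellAt k)).flatten) := by
  have hbody : (fun (t : List Char) (name : String) =>
        if (k : Int) < (name.toList.length : Int) then
          t ++ pyLjust [PySem.List.pyGetD name.toList (k : Int) ' '] 3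
        else t ++ List.replicate 3 ' ')
      = (fun t name => t ++ cellAt k name) := by
    funext t name
    simp only [cellAt, PySem.List.pyGetD_natCast]
    split_ifs with h h' h'
    · rfl
    · exact absurd (by exact_mod_cast h) h'
    · exact absurd (by exact_mod_cast h') h
    · rfl
  rw [hbody, PySem.List.foldl_append_eq_flatMap, List.flatMap_def]
  simp

-- B's inner loop (one name): appends a gap-padded segment at rows s..s+len-1 and stamps the fill
theorem inner_eq (cs : List Char) (a : Int) :
    ∀ (s : Nat) (bufs : List (List (List Char))) (fill : List Int),
    s + cs.length ≤ bufs.length → fill.length = bufs.length →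
    (let out := (PySem.List.enumerate cs (s : Int)).foldl (fun st rc =>
        (st.1.set rc.1.toNat ((st.1.getD rc.1.toNat []) ++
            [List.replicate (a - st.2.getD rc.1.toNat 0).toNat ' ' ++ [rc.2]]),
         st.2.set rc.1.toNat (a + 1))) (bufs, fill)
     out.1.length = bufs.length ∧ out.2.length = fill.length ∧
     ∀ i, i < bufs.length →
       (out.1.getD i [] = if s ≤ i ∧ i < s + cs.length then
           bufs.getD i [] ++ [List.replicate (a - fill.getD i 0).toNat ' ' ++ [cs.getD (i - s) ' ']]
         else bufs.getD i []) ∧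
       (out.2.getD i 0 = if s ≤ i ∧ i < s + cs.length then a + 1 else fill.getD i 0)) := by
  induction cs with
  | nil =>
      intro s bufs fill _ _
      refine ⟨by simp [PySem.List.enumerate_nil], by simp [PySem.List.enumerate_nil], ?_⟩
      intro i hi
      simp only [PySem.List.enumerate_nil, List.foldl_nil, List.length_nil]
      constructor
      · rw [if_neg (by omega)]
      · rw [if_neg (by omega)]
  | cons c cs ih =>
      intro s bufs fill hlen hfb
      simp only [List.length_cons] at hlen
      rw [PySem.List.enumerate_cons, List.foldl_cons]
      have hcast : ((s : Int) + 1) = ((s + 1 : Nat) : Int) := by push_cast; ring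
      have htn : ((s : Int)).toNat = s := Int.toNat_natCast s
      simp only [htn, hcast]
      obtain ⟨hl1, hl2, hel⟩ := ih (s + 1)
        (bufs.set s (bufs.getD s [] ++ [List.replicate (a - fill.getD s 0).toNat ' ' ++ [c]]))
        (fill.set s (a + 1))
        (by rw [List.length_set]; omega) (by rw [List.length_set, List.length_set, hfb])
      refine ⟨by rw [hl1, List.length_set], by rw [hl2, List.length_set], ?_⟩
      intro i hi
      obtain ⟨he1, he2⟩ := hel i (by rw [List.length_set]; omega)
      rw [he1, he2]
      by_cases h1 : s + 1 ≤ i ∧ i < s + 1 + cs.length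
      · rw [if_pos h1, if_pos h1, if_pos (by simp only [List.length_cons]; omega),
          if_pos (by simp only [List.length_cons]; omega)]
        have hne : s ≠ i := by omega
        have hb : (bufs.set s (bufs.getD s [] ++ [List.replicate (a - fill.getD s 0).toNat ' ' ++ [c]])).getD i []
            = bufs.getD i [] := by
          simp [List.getD_eq_getElem?_getD, List.getElem?_set_ne hne]
        have hf : (fill.set s (a + 1)).getD i 0 = fill.getD i 0 := by
          simp [List.getD_eq_getElem?_getD, List.getElem?_set_ne hne]
        rw [hb, hf]
        have hc : (c :: cs).getD (i - s) ' ' = cs.getD (i - (s + 1)) ' ' := by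
          have h2 : i - s = (i - (s + 1)) + 1 := by omega
          rw [h2]; rfl
        rw [hc]
        exact ⟨rfl, rfl⟩
      · rw [if_neg h1, if_neg h1]
        by_cases h2 : i = s
        · subst h2
          rw [if_pos (by simp only [List.length_cons]; omega),
            if_pos (by simp only [List.length_cons]; omega)]
          have hii : i - i = 0 := by omega
          constructor
          · simp [List.getD_eq_getElem?_getD, List.getElem?_set_self hi]
          · simp only [List.getD_eq_getElem?_getD,
              List.getElem?_set_self (by omega : i < fill.length), Option.getD_some]
        · rw [if_neg (by simp only [List.length_cons]; omega),
            if_neg (by simp only [List.length_cons]; omega)]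
          constructor
          · simp [List.getD_eq_getElem?_getD, List.getElem?_set_ne (by omega : s ≠ i)]
          · simp [List.getD_eq_getElem?_getD, List.getElem?_set_ne (by omega : s ≠ i)]

-- outer invariant: after processing `rest` starting at index j, each row buffer flattened and
-- padded to the full accumulated width = the old padded content followed by rest's cells
theorem outer_inv (R : Nat) :
    ∀ (rest : List String) (j : Nat) (bufs : List (List (List Char))) (fill : List Int),
    bufs.length = R → fill.length = R →
    (∀ name ∈ rest, name.toList.length ≤ R) →
    (∀ r, r < R → 0 ≤ fill.getD r 0 ∧ fill.getD r 0 ≤ ((3 * j : Nat) : Int)) →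
    (let out := (PySem.List.enumerate rest (j : Int)).foldl (fun st jn =>
        (PySem.List.enumerate jn.2.toList).foldl (fun st rc =>
          (st.1.set rc.1.toNat ((st.1.getD rc.1.toNat []) ++
              [List.replicate (3 * jn.1 - st.2.getD rc.1.toNat 0).toNat ' ' ++ [rc.2]]),
           st.2.set rc.1.toNat (3 * jn.1 + 1))) st) (bufs, fill)
     out.1.length = R ∧ out.2.length = R ∧
     ∀ r, r < R →
       (out.1.getD r []).flatten ++
           List.replicate (((3 * (j + rest.length) : Nat) : Int) - out.2.getD r 0).toNat ' '
         = (bufs.getD r []).flatten ++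
             List.replicate (((3 * j : Nat) : Int) - fill.getD r 0).toNat ' ' ++
             (rest.map (cellAt r)).flatten) := by
  intro rest
  induction rest with
  | nil =>
      intro j bufs fill hb hf _ _
      refine ⟨by simp [PySem.List.enumerate_nil, hb], by simp [PySem.List.enumerate_nil, hf], ?_⟩
      intro r hr
      simp [PySem.List.enumerate_nil]
  | cons name rest ih =>
      intro j bufs fill hb hf hmax hbound
      rw [PySem.List.enumerate_cons, List.foldl_cons]
      have hcast : ((j : Int) + 1) = ((j + 1 : Nat) : Int) := by push_cast; ring
      dsimp only
      simp only [hcast]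
      obtain ⟨hl1, hl2, hel⟩ := inner_eq name.toList (3 * (j : Int)) 0 bufs fill
        (by rw [hb]; have := hmax name (by simp); omega) (by rw [hb, hf])
      simp only [Nat.cast_zero, Nat.zero_add, Nat.zero_le, true_and, Nat.sub_zero] at hl1 hl2 hel
      set st' := (PySem.List.enumerate name.toList).foldl (fun st rc =>
          (st.1.set rc.1.toNat ((st.1.getD rc.1.toNat []) ++
              [List.replicate (3 * (j : Int) - st.2.getD rc.1.toNat 0).toNat ' ' ++ [rc.2]]),
           st.2.set rc.1.toNat (3 * (j : Int) + 1))) (bufs, fill) with hst'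
      have hb' : st'.1.length = R := by rw [hl1, hb]
      have hf' : st'.2.length = R := by rw [hl2, hf]
      have hmax' : ∀ nm ∈ rest, nm.toList.length ≤ R := fun nm hm => hmax nm (by simp [hm])
      have hbound' : ∀ r, r < R → 0 ≤ st'.2.getD r 0 ∧ st'.2.getD r 0 ≤ ((3 * (j + 1) : Nat) : Int) := by
        intro r hr
        obtain ⟨_, he2⟩ := hel r (by omega)
        rw [he2]
        have := hbound r hr
        split_ifs with h
        · refine ⟨by push_cast; omega, by push_cast; omega⟩
        · refine ⟨this.1, ?_⟩
          have h2 : ((3 * j : Nat) : Int) ≤ ((3 * (j + 1) : Nat) : Int) := by push_cast; omega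
          omega
      obtain ⟨ho1, ho2, hinv⟩ := ih (j + 1) st'.1 st'.2 hb' hf' hmax' hbound'
      refine ⟨ho1, ho2, ?_⟩
      intro r hr
      have harith : (3 * (j + (name :: rest).length) : Nat) = (3 * ((j + 1) + rest.length) : Nat) := by
        simp only [List.length_cons]; ring
      rw [harith, hinv r hr]
      obtain ⟨he1, he2⟩ := hel r (by omega)
      obtain ⟨hge, hle⟩ := hbound r hr
      have hstep : (st'.1.getD r []).flatten ++
            List.replicate (((3 * (j + 1) : Nat) : Int) - st'.2.getD r 0).toNat ' '
          = (bufs.getD r []).flatten ++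
              List.replicate (((3 * j : Nat) : Int) - fill.getD r 0).toNat ' ' ++ cellAt r name := by
        rw [he1, he2]
        by_cases h : r < name.toList.length
        · rw [if_pos (by omega), if_pos (by omega)]
          have e2 : (((3 * (j + 1) : Nat) : Int) - (3 * (j : Int) + 1)).toNat = 2 := by
            push_cast; omega
          have ej : (3 * (j : Int)) = ((3 * j : Nat) : Int) := by push_cast; ring
          have hcell : cellAt r name = [name.toList.getD r ' '] ++ List.replicate 2 ' ' := by
            unfold cellAt pyLjust
            rw [if_pos h]
            rfl
          rw [e2, List.flatten_append, ej, hcell]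
          simp [List.append_assoc]
        · rw [if_neg (by omega), if_neg (by omega)]
          have e3 : (((3 * (j + 1) : Nat) : Int) - fill.getD r 0).toNat
              = (((3 * j : Nat) : Int) - fill.getD r 0).toNat + 3 := by
            omega
          have hcell : cellAt r name = List.replicate 3 ' ' := by
            unfold cellAt pyLjust
            rw [if_neg h]
            rfl
          rw [e3, List.replicate_add, hcell]
          simp [List.append_assoc]
      rw [hstep]
      simp [List.append_assoc]

theorem add_category_names_spec_aux (names : List String)
    (h : Pre_add_category_names names) :
    add_category_names names = add_category_names_alt names := by
  obtain ⟨m, hm⟩ : ∃ m, PySem.List.max? names PySem.Str.len = some m := by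
    cases hmax : PySem.List.max? names PySem.Str.len with
    | none => exact absurd (PySem.List.max?_eq_none_iff names PySem.Str.len |>.mp hmax) h
    | some m => exact ⟨m, rfl⟩
  have hmaxle : ∀ name ∈ names, name.toList.length ≤ m.toList.length := by
    intro name hmem
    have := PySem.List.max?_isMax hm name hmem
    simp only [PySem.Str.len_eq] at this
    exact_mod_cast this
  unfold add_category_names add_category_names_alt
  simp only [hm, Option.getD_some, PySem.Str.len_eq, Int.toNat_natCast]
  obtain ⟨hBlen1, hBlen2, hBinv⟩ := outer_inv m.toList.length names 0
    (List.replicate m.toList.length []) (List.replicate m.toList.length 0)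
    (by simp only [List.length_replicate]) (by simp only [List.length_replicate]) hmaxle
    (by intro r hr
        simp only [List.getD_eq_getElem?_getD, List.getElem?_replicate]
        rw [if_pos hr]
        simp)
  simp only [Nat.cast_zero] at hBlen1 hBlen2 hBinv
  rw [PySem.List.pyRange_zero_nat, List.foldl_map,
    PySem.List.foldl_append_eq_flatMap, List.flatMap_def, List.nil_append]
  congr 1
  congr 1
  apply List.map_congr_left
  intro r hrmem
  have hr : r < m.toList.length := List.mem_range.mp hrmem
  refine (a_row_eq names r).trans ?_
  have hmem := hBinv r hr
  have hwidth : ((3 * (0 + names.length) : Nat) : Int) = 3 * (names.length : Int) := by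
    push_cast; ring
  rw [hwidth] at hmem
  have hzero1 : ((List.replicate m.toList.length ([] : List (List Char))).getD r []).flatten = [] := by
    simp only [List.getD_eq_getElem?_getD, List.getElem?_replicate]
    rw [if_pos hr]
    rfl
  have hzero2 : (List.replicate m.toList.length (0 : Int)).getD r 0 = 0 := by
    simp only [List.getD_eq_getElem?_getD, List.getElem?_replicate]
    rw [if_pos hr]
    rfl
  rw [hzero1, hzero2] at hmem
  have e0 : ((3 * 0 : Nat) : Int) = 0 := by norm_num
  simp only [e0, Int.sub_zero, Int.toNat_zero, List.replicate_zero, List.nil_append] at hmem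
  rw [← hmem]

-- ===== VERDICT (by name: the statement is the Claim_ definition above) =====
theorem add_category_names_spec : Claim_equal_add_category_names := by
  intro names _ hpre
  exact add_category_names_spec_aux names hpre
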